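-- pv_equiv track=rewrite | github.com/ist356/assignment-02-ccluett50 | code/packaging.py | parse_packaging
-- ===== SOURCE A (Python) =====
-- def parse_packaging(packaging_data: str) -> list[dict]:
--     '''
--     This function parses a string of packaging data and returns a list of dictionaries.
--     The order of the list implies the order of the packaging data.
--
--     Examples:
--
--     input: "12 eggs in 1 carton"
--     ouput: [{ 'eggs' : 12}, {'carton' : 1}]
--
--     input: "6 bars in 1 pack / 12 packs in 1 carton"
--     output: [{ 'bars' : 6}, {'packs' : 12}, {'carton' : 1}]
--
--     input: "20 pieces in 1 pack / 10 packs in 1 carton / 4 cartons in 1 box"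
--     output: [{ 'pieces' : 20}, {'packs' : 10}, {'carton' : 4}, {'box' : 1}]
--     '''
--
--     temp_package = []
--
--     for data in packaging_data.split(' / '):
--         m_item = data.split(" in ")[0]
--         m_quantity = int(m_item.split()[0])
--         m_item = m_item.split()[1].strip()
--         temp_package.append({m_item: m_quantity})
--
--         s_item = data.split(" in ")[1]
--         s_quantity = int(s_item.split()[0])
--         s_item = s_item.split()[1].strip()
--         temp_package.append({s_item: s_quantity})
--
--     # Filter out consecutive duplicates
--     #rstrip is used due to the plural form of items that is matching the strings
--     package = []
--
--     for i in range(len(temp_package) - 1):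
--         current_item = list(temp_package[i].keys())[0].rstrip('s')
--         next_item = list(temp_package[i + 1].keys())[0].rstrip('s')
--         if current_item != next_item:
--             package.append(temp_package[i])
--     package.append(temp_package[-1])
--
--     return package
-- ===== SOURCE B (Python) =====
-- def parse_packaging(packaging_data: str) -> list[dict]:
--     '''One-pass rewrite: build the result directly, popping the previous
--     entry when its key (modulo trailing "s") matches the new one.'''
--     package = []
--     for data in packaging_data.split(' / '):
--         parts = data.split(" in ")
--         for part in (parts[0], parts[1]):
--             words = part.split()
--             quantity = int(words[0])
--             item = words[1].strip()
--             if package and list(package[-1].keys())[0].rstrip('s') == item.rstrip('s'):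
--                 package.pop()
--             package.append({item: quantity})
--     return package
-- ===== Notes on version B (the rewrite author's own statement) =====
-- stated objective: simpler
-- what changed: B builds the result in a single pass over the ' / ' segments, popping the previous entry when its key (modulo trailing 's') matches the new one, instead of A's two-pass scheme of building a temp list and then filtering consecutive duplicates by index.
-- outside the precondition, e.g. on parse_packaging(' / '): A raises IndexError, B raises IndexError; on parse_packaging(' in '): A raises IndexError, B raises IndexError
import Mathlib
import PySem

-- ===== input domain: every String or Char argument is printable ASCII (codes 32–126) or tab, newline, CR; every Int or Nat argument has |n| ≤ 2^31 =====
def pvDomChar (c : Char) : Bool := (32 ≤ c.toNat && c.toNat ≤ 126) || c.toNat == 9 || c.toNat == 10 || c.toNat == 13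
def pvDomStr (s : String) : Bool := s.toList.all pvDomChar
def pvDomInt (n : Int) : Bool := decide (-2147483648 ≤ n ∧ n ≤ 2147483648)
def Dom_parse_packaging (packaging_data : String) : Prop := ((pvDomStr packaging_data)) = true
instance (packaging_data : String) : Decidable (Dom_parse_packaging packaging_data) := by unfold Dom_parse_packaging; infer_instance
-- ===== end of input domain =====

-- B rebuilds the result in ONE pass (push with pop-on-matching-key) instead of A's
-- temp list + second index-based dedup pass; equivalence of return values is proved below.


-- hand port of str.rstrip('s'): drop every trailing 's' (exact: rstrip removes all trailing chars of the set)
def pvRstripS (s : String) : List Char := (s.toList.reverse.dropWhile (fun c => c == 's')).reverse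

-- ===== PORT A =====
-- the three parsing lines A performs for each of the main and the secondary part:
--   quantity = int(part.split()[0]); item = part.split()[1].strip()
def pvParsePart (part : String) : Option (String × Int) :=
  let words := PySem.Str.split₀ part
  match PySem.List.pyGet? words 0 with
  | none => none                         -- IndexError
  | some w0 =>
    match PySem.Int.ofStr? w0 with
    | none => none                       -- ValueError
    | some q =>
      match PySem.List.pyGet? words 1 with
      | none => none                     -- IndexError
      | some w1 => some (PySem.Str.strip w1, q)

-- A's first loop, building temp_package (none = the Python raised)
def pvStepA (acc : Option (List (List (String × Int)))) (data : String) :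
    Option (List (List (String × Int))) :=
  acc.bind fun temp =>
    let parts := (PySem.Str.split? data " in ").getD []
    match PySem.List.pyGet? parts 0 with
    | none => none
    | some m =>
      match pvParsePart m with
      | none => none
      | some mp =>
        match PySem.List.pyGet? parts 1 with
        | none => none                   -- IndexError: segment has no " in "
        | some sPart =>
          match pvParsePart sPart with
          | none => none
          | some sp => some (temp ++ [[mp], [sp]])

-- A's second loop: filter out consecutive duplicates by index, then append temp_package[-1]
def pvFilterPhase (temp : List (List (String × Int))) : List (List (String × Int)) :=
  let package :=
    (PySem.List.pyRange 0 ((temp.length : Int) - 1) 1).foldl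
      (fun package i =>
        match PySem.List.pyGet? temp i, PySem.List.pyGet? temp (i + 1) with
        | some cur, some nxt =>
          match PySem.List.pyGet? (cur.map Prod.fst) 0, PySem.List.pyGet? (nxt.map Prod.fst) 0 with
          | some ck, some nk => if pvRstripS ck ≠ pvRstripS nk then package ++ [cur] else package
          | _, _ => package              -- unreachable: the dicts are singletons
        | _, _ => package                -- unreachable: i is in range
      ) []
  match PySem.List.pyGet? temp (-1) with
  | none => []                           -- temp_package[-1] on empty list: IndexError (outside Pre_)
  | some lastD => package ++ [lastD]

def parse_packaging (packaging_data : String) : List (List (String × Int)) :=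
  match ((PySem.Str.split? packaging_data " / ").getD []).foldl pvStepA (some []) with
  | none => []                           -- the Python raises here (outside Pre_)
  | some temp => pvFilterPhase temp

-- ===== PORT B =====
-- helper _add of Source B: parse one part, pop the previous entry when its key
-- (modulo trailing 's') matches, append the new {item: quantity}
def pvAdd (package : List (List (String × Int))) (part : String) :
    Option (List (List (String × Int))) :=
  let words := PySem.Str.split₀ part
  match PySem.List.pyGet? words 0 with
  | none => none                         -- IndexError
  | some w0 =>
    match PySem.Int.ofStr? w0 with
    | none => none                       -- ValueError
    | some quantity =>
      match PySem.List.pyGet? words 1 with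
      | none => none                     -- IndexError
      | some w1 =>
        let item := PySem.Str.strip w1
        let package :=
          match package.getLast? with
          | none => package
          | some lastD =>
            match PySem.List.pyGet? (lastD.map Prod.fst) 0 with
            | none => package
            | some k => if pvRstripS k = pvRstripS item then package.dropLast else package
        some (package ++ [[(item, quantity)]])

def pvStepB (acc : Option (List (List (String × Int)))) (data : String) :
    Option (List (List (String × Int))) :=
  acc.bind fun package =>
    let parts := (PySem.Str.split? data " in ").getD []
    match PySem.List.pyGet? parts 0 with
    | none => none
    | some p0 =>
      match pvAdd package p0 with
      | none => none
      | some package =>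
        match PySem.List.pyGet? parts 1 with
        | none => none                   -- IndexError: segment has no " in "
        | some p1 => pvAdd package p1

def parse_packaging_alt (packaging_data : String) : List (List (String × Int)) :=
  (((PySem.Str.split? packaging_data " / ").getD []).foldl pvStepB (some [])).getD []

-- ===== PRECONDITION & SPEC =====
def pvPartOK (part : String) : Bool :=
  let words := PySem.Str.split₀ part
  decide (2 ≤ words.length) && (PySem.Int.ofStr? (words.headD "")).isSome

def pvSegOK (data : String) : Bool :=
  let parts := (PySem.Str.split? data " in ").getD []
  decide (2 ≤ parts.length) && pvPartOK (parts.headD "") && pvPartOK (parts[1]?.getD "")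

-- Pre_ excludes exactly the inputs on which the Python A raises: a ' / ' segment without
-- " in " (IndexError), a part with fewer than two whitespace-words (IndexError), or a
-- first word that int() cannot parse (ValueError).
def Pre_parse_packaging (packaging_data : String) : Prop :=
  ∀ data ∈ (PySem.Str.split? packaging_data " / ").getD [], pvSegOK data = true

instance (packaging_data : String) : Decidable (Pre_parse_packaging packaging_data) := by
  unfold Pre_parse_packaging; infer_instance

def pvWitness_parse_packaging : String := "12 eggs in 1 carton"

def Spec_parse_packaging (packaging_data : String) (out : List (List (String × Int))) : Prop := out = parse_packaging_alt packaging_data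
instance (packaging_data : String) (out : List (List (String × Int))) : Decidable (Spec_parse_packaging packaging_data out) := by unfold Spec_parse_packaging; infer_instance

-- ===== CLAIM (what is proved, stated in full; the proofs are below) =====
def Claim_equal_parse_packaging : Prop := ∀ (packaging_data : String), Dom_parse_packaging packaging_data → Pre_parse_packaging packaging_data → Spec_parse_packaging packaging_data (parse_packaging packaging_data)

-- ===== LEMMAS AND PROOFS =====

-- first key of a (nonempty) dict, rstripped
def pvKeyD (d : List (String × Int)) : List Char := pvRstripS ((d.map Prod.fst).headD "")

-- B's push step, expressed on a ready-made dict
def pvPush (package : List (List (String × Int))) (d : List (String × Int)) :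
    List (List (String × Int)) :=
  (match package.getLast? with
   | none => package
   | some lastD =>
     match PySem.List.pyGet? (lastD.map Prod.fst) 0 with
     | none => package
     | some k =>
       match PySem.List.pyGet? (d.map Prod.fst) 0 with
       | none => package
       | some k' => if pvRstripS k = pvRstripS k' then package.dropLast else package) ++ [d]

-- the common specification: drop each entry whose key equals the next entry's key
def pvDedup : List (List (String × Int)) → List (List (String × Int))
  | [] => []
  | [d] => [d]
  | d1 :: d2 :: r => (if pvKeyD d1 = pvKeyD d2 then [] else [d1]) ++ pvDedup (d2 :: r)

theorem pvAdd_eq (pkg : List (List (String × Int))) (part : String) :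
    pvAdd pkg part = (pvParsePart part).map (fun p => pvPush pkg [p]) := by
  unfold pvAdd pvParsePart pvPush
  simp only []
  cases h0 : PySem.List.pyGet? (PySem.Str.split₀ part) 0 with
  | none => rfl
  | some w0 =>
    dsimp only
    cases h1 : PySem.Int.ofStr? w0 with
    | none => rfl
    | some q =>
      dsimp only
      cases h2 : PySem.List.pyGet? (PySem.Str.split₀ part) 1 with
      | none => rfl
      | some w1 =>
        dsimp only [Option.map_some]
        cases hl : pkg.getLast? with
        | none => simp
        | some lastD =>
          cases hk : PySem.List.pyGet? (lastD.map Prod.fst) 0 with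
          | none => simp [PySem.List.pyGet?, PySem.List.pyIdx?]
          | some k => simp [PySem.List.pyGet?, PySem.List.pyIdx?]

theorem pvKey?_of_ne (d : List (String × Int)) (h : d ≠ []) :
    PySem.List.pyGet? (d.map Prod.fst) 0 = some ((d.map Prod.fst).headD "") := by
  cases d with
  | nil => exact absurd rfl h
  | cons a l => simp [PySem.List.pyGet?, PySem.List.pyIdx?]

theorem pvPush_acc (xs : List (List (String × Int))) (acc : List (List (String × Int)))
    (d : List (String × Int)) :
    List.foldl pvPush (acc ++ [d]) xs = acc ++ List.foldl pvPush [d] xs := by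
  induction xs generalizing acc d with
  | nil => simp
  | cons x xs ih =>
    have hstep : pvPush (acc ++ [d]) x = acc ++ pvPush [d] x := by
      unfold pvPush
      rw [List.getLast?_concat]
      simp only [List.getLast?_singleton, List.dropLast_concat, List.dropLast_singleton]
      cases PySem.List.pyGet? (d.map Prod.fst) 0 with
      | none => simp
      | some k =>
        cases PySem.List.pyGet? (x.map Prod.fst) 0 with
        | none => simp
        | some k' =>
          by_cases hkk : pvRstripS k = pvRstripS k' <;> simp [hkk]
    have hsplit : ∃ pre, pvPush [d] x = pre ++ [x] := ⟨_, rfl⟩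
    obtain ⟨pre, hpre⟩ := hsplit
    calc List.foldl pvPush (acc ++ [d]) (x :: xs)
        = List.foldl pvPush (acc ++ pvPush [d] x) xs := by
          simp only [List.foldl_cons, hstep]
      _ = List.foldl pvPush ((acc ++ pre) ++ [x]) xs := by rw [hpre, List.append_assoc]
      _ = (acc ++ pre) ++ List.foldl pvPush [x] xs := ih _ _
      _ = acc ++ List.foldl pvPush (pre ++ [x]) xs := by rw [ih pre x, List.append_assoc]
      _ = acc ++ List.foldl pvPush (pvPush [d] x) xs := by rw [hpre]
      _ = acc ++ List.foldl pvPush [d] (x :: xs) := by simp only [List.foldl_cons]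

theorem pvFoldPush_aux (rest : List (List (String × Int))) (d1 : List (String × Int))
    (h1 : d1 ≠ []) (h : ∀ d ∈ rest, d ≠ []) :
    List.foldl pvPush [d1] rest = pvDedup (d1 :: rest) := by
  induction rest generalizing d1 with
  | nil => rfl
  | cons d2 r ih =>
    have hd2 : d2 ≠ [] := h d2 (by simp)
    have hr : ∀ d ∈ r, d ≠ [] := fun d hd => h d (by simp [hd])
    have hpush : pvPush [d1] d2
        = (if pvKeyD d1 = pvKeyD d2 then [] else [d1]) ++ [d2] := by
      unfold pvPush
      simp only [List.getLast?_singleton, List.dropLast_singleton]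
      rw [pvKey?_of_ne d1 h1, pvKey?_of_ne d2 hd2]
      unfold pvKeyD
      by_cases hkk : pvRstripS ((d1.map Prod.fst).headD "") = pvRstripS ((d2.map Prod.fst).headD "") <;>
        simp [hkk]
    calc List.foldl pvPush [d1] (d2 :: r)
        = List.foldl pvPush (pvPush [d1] d2) r := by simp only [List.foldl_cons]
      _ = List.foldl pvPush ((if pvKeyD d1 = pvKeyD d2 then [] else [d1]) ++ [d2]) r := by rw [hpush]
      _ = (if pvKeyD d1 = pvKeyD d2 then [] else [d1]) ++ List.foldl pvPush [d2] r := pvPush_acc r _ d2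
      _ = (if pvKeyD d1 = pvKeyD d2 then [] else [d1]) ++ pvDedup (d2 :: r) := by rw [ih d2 hd2 hr]
      _ = pvDedup (d1 :: d2 :: r) := rfl

theorem pvFoldPush_eq (t : List (List (String × Int))) (h : ∀ d ∈ t, d ≠ []) :
    List.foldl pvPush [] t = pvDedup t := by
  cases t with
  | nil => rfl
  | cons d rest =>
    have hd : d ≠ [] := h d (by simp)
    have hr : ∀ x ∈ rest, x ≠ [] := fun x hx => h x (by simp [hx])
    have h0 : pvPush [] d = [d] := rfl
    simp only [List.foldl_cons, h0]
    exact pvFoldPush_aux rest d hd hr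

theorem pvStepA_none (segs : List String) : segs.foldl pvStepA none = none := by
  induction segs with
  | nil => rfl
  | cons d segs ih => simpa [pvStepA] using ih

theorem pvStepB_none (segs : List String) : segs.foldl pvStepB none = none := by
  induction segs with
  | nil => rfl
  | cons d segs ih => simpa [pvStepB] using ih

theorem pvFold_rel (segs : List String) (t : List (List (String × Int))) :
    segs.foldl pvStepB (some (List.foldl pvPush [] t))
      = (segs.foldl pvStepA (some t)).map (fun t' => List.foldl pvPush [] t') := by
  induction segs generalizing t with
  | nil => rfl
  | cons data segs ih =>
    simp only [List.foldl_cons]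
    have hB : pvStepB (some (List.foldl pvPush [] t)) data
        = (pvStepA (some t) data).map (fun t' => List.foldl pvPush [] t') := by
      unfold pvStepA pvStepB
      simp only [Option.bind_some]
      cases PySem.List.pyGet? ((PySem.Str.split? data " in ").getD []) 0 with
      | none => rfl
      | some m =>
        dsimp only
        rw [pvAdd_eq]
        cases pvParsePart m with
        | none => rfl
        | some mp =>
          dsimp only [Option.map_some]
          cases PySem.List.pyGet? ((PySem.Str.split? data " in ").getD []) 1 with
          | none => rfl
          | some sPart =>
            dsimp only
            rw [pvAdd_eq]
            cases pvParsePart sPart with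
            | none => rfl
            | some sp =>
              dsimp only [Option.map_some]
              congr 1
              rw [List.foldl_append]
              rfl
    rw [hB]
    cases h : pvStepA (some t) data with
    | none => simp [pvStepA_none, pvStepB_none]
    | some t2 => simpa using ih t2

theorem pvStepA_some (t t2 : List (List (String × Int))) (data : String)
    (h : pvStepA (some t) data = some t2) : ∃ a b, t2 = t ++ [[a], [b]] := by
  unfold pvStepA at h
  simp only [Option.bind_some] at h
  cases h0 : PySem.List.pyGet? ((PySem.Str.split? data " in ").getD []) 0 with
  | none => rw [h0] at h; exact absurd h (by simp)
  | some m =>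
    rw [h0] at h; dsimp only at h
    cases h1 : pvParsePart m with
    | none => rw [h1] at h; exact absurd h (by simp)
    | some mp =>
      rw [h1] at h; dsimp only at h
      cases h2 : PySem.List.pyGet? ((PySem.Str.split? data " in ").getD []) 1 with
      | none => rw [h2] at h; exact absurd h (by simp)
      | some sPart =>
        rw [h2] at h; dsimp only at h
        cases h3 : pvParsePart sPart with
        | none => rw [h3] at h; exact absurd h (by simp)
        | some sp =>
          rw [h3] at h; dsimp only at h
          exact ⟨mp, sp, (Option.some_inj.mp h).symm⟩

theorem pvFold_ne (segs : List String) (t : List (List (String × Int)))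
    (h : ∀ d ∈ t, d ≠ []) (t' : List (List (String × Int)))
    (heq : segs.foldl pvStepA (some t) = some t') : ∀ d ∈ t', d ≠ [] := by
  induction segs generalizing t with
  | nil => exact (Option.some_inj.mp heq) ▸ h
  | cons data segs ih =>
    simp only [List.foldl_cons] at heq
    cases hs : pvStepA (some t) data with
    | none => rw [hs, pvStepA_none] at heq; exact absurd heq (by simp)
    | some t2 =>
      rw [hs] at heq
      obtain ⟨a, b, rfl⟩ := pvStepA_some t t2 data hs
      refine ih _ ?_ heq
      intro d hd
      rcases List.mem_append.mp hd with h1 | h2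
      · exact h d h1
      · simp only [List.mem_cons, List.mem_singleton] at h2
        rcases h2 with rfl | rfl | h2 <;> simp_all

theorem pvGet_neg_one (t : List (List (String × Int))) (ht : t ≠ []) :
    PySem.List.pyGet? t (-1) = some (t.getLast ht) := by
  have h1 : 1 ≤ t.length := List.length_pos_iff.mpr ht
  simp only [PySem.List.pyGet?, PySem.List.pyIdx?]
  norm_num [h1]
  rw [List.getLast_eq_getElem, List.getElem?_eq_getElem (by omega)]

theorem pvFilter_aux (rest : List (List (String × Int))) (d1 : List (String × Int))
    (h : ∀ d ∈ (d1 :: rest), d ≠ []) :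
    (((List.range ((d1 :: rest).length - 1)).filter
        (fun i => decide (pvKeyD ((d1 :: rest).getD i []) ≠ pvKeyD ((d1 :: rest).getD (i+1) [])))).map
      (fun i => (d1 :: rest).getD i []))
      ++ [(d1 :: rest).getLast (by simp)] = pvDedup (d1 :: rest) := by
  induction rest generalizing d1 with
  | nil => simp [pvDedup]
  | cons d2 r ih =>
    have hshift : ∀ i : Nat, (d1 :: d2 :: r).getD (i + 1) [] = (d2 :: r).getD i [] := by
      intro i; simp [List.getD]
    have hlast : (d1 :: d2 :: r).getLast (by simp) = (d2 :: r).getLast (by simp) :=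
      List.getLast_cons (by simp)
    have hlen : (d1 :: d2 :: r).length - 1 = r.length + 1 := by simp
    rw [hlen, List.range_succ_eq_map]
    simp only [List.filter_cons, List.filter_map, List.map_map, hlast]
    have hget0 : (d1 :: d2 :: r).getD 0 [] = d1 := rfl
    have hget1 : (d1 :: d2 :: r).getD 1 [] = d2 := rfl
    have hf : ∀ i ∈ List.range r.length,
        ((fun i => decide (pvKeyD ((d1 :: d2 :: r).getD i []) ≠ pvKeyD ((d1 :: d2 :: r).getD (i+1) []))) ∘ Nat.succ) i
        = (fun i => decide (pvKeyD ((d2 :: r).getD i []) ≠ pvKeyD ((d2 :: r).getD (i+1) []))) i := by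
      intro i _; simp [Function.comp, hshift]
    have hcomp :
        List.map ((fun i => (d1 :: d2 :: r).getD i []) ∘ Nat.succ)
            ((List.range r.length).filter
              ((fun i => decide (pvKeyD ((d1 :: d2 :: r).getD i []) ≠ pvKeyD ((d1 :: d2 :: r).getD (i+1) []))) ∘ Nat.succ))
        = (((List.range r.length).filter
            (fun i => decide (pvKeyD ((d2 :: r).getD i []) ≠ pvKeyD ((d2 :: r).getD (i+1) [])))).map
          (fun i => (d2 :: r).getD i [])) := by
      rw [List.filter_congr hf]
      exact List.map_congr_left (fun i _ => by simp [Function.comp, hshift])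
    have hrest : ∀ d ∈ d2 :: r, d ≠ [] := fun d hd => h d (List.mem_cons_of_mem d1 hd)
    have ih' := ih d2 hrest
    simp only [List.length_cons, Nat.add_sub_cancel] at ih'
    by_cases hk : pvKeyD d1 = pvKeyD d2
    · rw [if_neg (by simp [hget0, hget1, hk])]
      rw [List.map_map, hcomp]
      rw [ih']
      simp [pvDedup, hk]
    · rw [if_pos (by simp [hget0, hget1, hk])]
      simp only [List.map_cons, List.map_map, hget0]
      rw [hcomp, List.cons_append]
      rw [ih']
      simp [pvDedup, hk]

theorem pvGetD_of_lt (t : List (List (String × Int))) (i : Nat) (hi : i < t.length) :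
    PySem.List.pyGet? t (i : Int) = some (t.getD i []) := by
  rw [PySem.List.pyGet?_natCast, List.getD_eq_getElem?_getD, List.getElem?_eq_getElem hi]
  rfl

theorem pvGetD_mem (t : List (List (String × Int))) (i : Nat) (hi : i < t.length) :
    t.getD i [] ∈ t := by
  rw [List.getD_eq_getElem?_getD, List.getElem?_eq_getElem hi]
  exact List.getElem_mem hi

theorem pvFilterPhase_eq (t : List (List (String × Int))) (h : ∀ d ∈ t, d ≠ []) :
    pvFilterPhase t = pvDedup t := by
  cases t with
  | nil => rfl
  | cons d1 rest =>
    have ht : (d1 :: rest) ≠ [] := by simp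
    unfold pvFilterPhase
    rw [pvGet_neg_one (d1 :: rest) ht]
    have hlen : (((d1 :: rest).length : Int) - 1) = (((d1 :: rest).length - 1 : Nat) : Int) := by
      simp
    rw [hlen, PySem.List.pyRange_zero_natCast, List.foldl_map]
    have hcong : ∀ (acc : List (List (String × Int))),
        ∀ i ∈ List.range ((d1 :: rest).length - 1),
        (fun pkg (k : Nat) =>
          match PySem.List.pyGet? (d1 :: rest) (k : Int),
                PySem.List.pyGet? (d1 :: rest) ((k : Int) + 1) with
          | some cur, some nxt =>
            match PySem.List.pyGet? (cur.map Prod.fst) 0, PySem.List.pyGet? (nxt.map Prod.fst) 0 with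
            | some ck, some nk => if pvRstripS ck ≠ pvRstripS nk then pkg ++ [cur] else pkg
            | _, _ => pkg
          | _, _ => pkg) acc i
        = (fun pkg (k : Nat) =>
            if (fun j => decide (pvKeyD ((d1 :: rest).getD j []) ≠ pvKeyD ((d1 :: rest).getD (j+1) []))) k = true
            then pkg ++ [(fun j => (d1 :: rest).getD j []) k] else pkg) acc i := by
      intro acc i hi
      rw [List.mem_range] at hi
      have hi1 : i < (d1 :: rest).length := by omega
      have hi2 : i + 1 < (d1 :: rest).length := by
        simp only [List.length_cons] at hi ⊢; omega
      have g1 : PySem.List.pyGet? (d1 :: rest) (i : Int) = some ((d1 :: rest).getD i []) :=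
        pvGetD_of_lt _ i hi1
      have g2 : PySem.List.pyGet? (d1 :: rest) ((i : Int) + 1) = some ((d1 :: rest).getD (i+1) []) := by
        have : ((i : Int) + 1) = ((i + 1 : Nat) : Int) := by push_cast; ring
        rw [this]; exact pvGetD_of_lt _ (i+1) hi2
      have hc : (d1 :: rest).getD i [] ≠ [] := h _ (pvGetD_mem _ i hi1)
      have hn : (d1 :: rest).getD (i+1) [] ≠ [] := h _ (pvGetD_mem _ (i+1) hi2)
      simp only [g1, g2, pvKey?_of_ne _ hc, pvKey?_of_ne _ hn]
      unfold pvKeyD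
      by_cases hkk : pvRstripS ((((d1 :: rest).getD i []).map Prod.fst).headD "")
          = pvRstripS ((((d1 :: rest).getD (i+1) []).map Prod.fst).headD "") <;> simp [hkk]
    rw [PySem.List.foldl_congr_mem _ _ _ [] hcong]
    rw [PySem.List.foldl_append_if]
    simpa using pvFilter_aux rest d1 h

-- ===== VERDICT (by name: the statement is the Claim_ definition above) =====
theorem parse_packaging_spec : Claim_equal_parse_packaging := by
  intro s _dom _pre
  unfold Spec_parse_packaging parse_packaging parse_packaging_alt
  have h := pvFold_rel ((PySem.Str.split? s " / ").getD []) []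
  simp only [List.foldl_nil] at h
  rw [h]
  cases heq : ((PySem.Str.split? s " / ").getD []).foldl pvStepA (some []) with
  | none => rfl
  | some t =>
      have hne : ∀ d ∈ t, d ≠ [] := pvFold_ne _ [] (by simp) t heq
      simp [pvFilterPhase_eq t hne, pvFoldPush_eq t hne]
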